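-- pv_equiv track=rewrite | github.com/mdikifahriza/autovideoeditor | core/planner.py | _cap_emphasis_segments
-- ===== SOURCE A (Python) =====
-- def _cap_emphasis_segments(segments: list[dict]) -> list[dict]:
--     if not segments:
--         return segments
--
--     max_allowed = max(1, int(len(segments) * 0.3))
--     used = 0
--     for segment in segments:
--         if segment.get("emphasis_text"):
--             used += 1
--             if used > max_allowed:
--                 segment["emphasis_text"] = None
--     return segments
-- ===== SOURCE B (Python) =====
-- def _cap_emphasis_segments(segments: list[dict]) -> list[dict]:
--     max_allowed = max(1, int(len(segments) * 0.3))
--     excess = sum(1 for seg in segments if seg.get("emphasis_text")) - max_allowed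
--     for seg in reversed(segments):
--         if excess <= 0:
--             break
--         if seg.get("emphasis_text"):
--             seg["emphasis_text"] = None
--             excess -= 1
--     return segments
-- ===== Notes on version B (the rewrite author's own statement) =====
-- stated objective: alternative
-- what changed: Instead of a forward pass with a running counter that clears once the counter passes the threshold, B first counts the emphasised segments, computes the excess over max_allowed, and walks the list BACKWARDS clearing exactly that many emphasised segments from the end.
import Mathlib
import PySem

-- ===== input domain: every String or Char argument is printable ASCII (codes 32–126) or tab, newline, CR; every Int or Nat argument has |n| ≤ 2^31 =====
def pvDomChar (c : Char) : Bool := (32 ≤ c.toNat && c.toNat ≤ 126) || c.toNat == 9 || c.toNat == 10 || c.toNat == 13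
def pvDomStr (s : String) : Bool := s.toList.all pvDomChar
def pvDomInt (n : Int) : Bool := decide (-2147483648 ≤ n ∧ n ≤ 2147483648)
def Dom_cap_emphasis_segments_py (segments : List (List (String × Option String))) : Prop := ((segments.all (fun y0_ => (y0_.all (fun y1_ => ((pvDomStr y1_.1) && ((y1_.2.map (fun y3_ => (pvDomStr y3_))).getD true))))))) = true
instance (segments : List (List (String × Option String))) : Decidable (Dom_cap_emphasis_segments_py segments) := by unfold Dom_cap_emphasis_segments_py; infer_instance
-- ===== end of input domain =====

-- B replaces A's forward pass with a running counter (clear once the counter exceeds the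
-- threshold) by: count the emphasised segments once, compute the excess over max_allowed,
-- then walk the list BACKWARDS clearing exactly that many emphasised segments from the end
-- (objective: alternative decomposition, same cost).
-- A (and B) mutate the segment dicts in place and return the same list object; the
-- equivalence proved here is about the returned value.

-- ===== PORT A =====
-- exact model of Python's int(n * 0.3) for n ≥ 0: 0.3 is the double 5404319552844595/2^54;
-- the integer product n*0.3 is rounded to 53 significant bits (ties to even), then truncated.
def pvInt03 (n : Nat) : Nat :=
  let m := n * 5404319552844595
  if m = 0 then 0
  else
    let k := Nat.log2 m + 1        -- bit length of m
    if k ≤ 53 then m / 2 ^ 54      -- exactly representable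
    else
      let s := k - 53
      let q := m / 2 ^ s
      let r := m % 2 ^ s
      let half := 2 ^ (s - 1)
      let q' := if half < r ∨ (r = half ∧ q % 2 = 1) then q + 1 else q
      q' * 2 ^ s / 2 ^ 54

-- segment.get("emphasis_text") is truthy iff present and a non-empty string
def pvTruthy (seg : List (String × Option String)) : Bool :=
  match (PySem.Dict.mk seg).get? "emphasis_text" with
  | some (some s) => !(s == "")
  | _ => false

-- segment["emphasis_text"] = None
def pvClear (seg : List (String × Option String)) : List (String × Option String) :=
  ((PySem.Dict.mk seg).insert "emphasis_text" none).items

-- the for-loop of A: running counter `used`, clear once past the threshold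
def pvALoop (m : Nat) (used : Nat) : List (List (String × Option String)) → List (List (String × Option String))
  | [] => []
  | seg :: rest =>
    if pvTruthy seg then
      (if used + 1 > m then pvClear seg else seg) :: pvALoop m (used + 1) rest
    else
      seg :: pvALoop m used rest

def cap_emphasis_segments_py (segments : List (List (String × Option String))) : List (List (String × Option String)) :=
  if segments.isEmpty then segments
  else pvALoop (max 1 (pvInt03 segments.length)) 0 segments

-- ===== PORT B =====
-- sum(1 for seg in segments if seg.get("emphasis_text"))
def pvCountEmph (segments : List (List (String × Option String))) : Int :=
  segments.foldl (fun acc seg => if pvTruthy seg then acc + 1 else acc) 0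

-- the for-loop of B over reversed(segments): break when excess ≤ 0, else clear emphasised
def pvBLoop (excess : Int) : List (List (String × Option String)) → List (List (String × Option String))
  | [] => []
  | seg :: rest =>
    if excess ≤ 0 then seg :: rest                      -- break
    else if pvTruthy seg then pvClear seg :: pvBLoop (excess - 1) rest
    else seg :: pvBLoop excess rest

def cap_emphasis_segments_py_alt (segments : List (List (String × Option String))) : List (List (String × Option String)) :=
  let maxAllowed : Nat := max 1 (pvInt03 segments.length)
  let excess : Int := pvCountEmph segments - (maxAllowed : Int)
  (pvBLoop excess segments.reverse).reverse

-- ===== PRECONDITION & SPEC =====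
def Spec_cap_emphasis_segments_py (segments : List (List (String × Option String))) (out : List (List (String × Option String))) : Prop := out = cap_emphasis_segments_py_alt segments
instance (segments : List (List (String × Option String))) (out : List (List (String × Option String))) : Decidable (Spec_cap_emphasis_segments_py segments out) := by unfold Spec_cap_emphasis_segments_py; infer_instance

-- ===== CLAIM (what is proved, stated in full; the proofs are below) =====
def Claim_equal_cap_emphasis_segments_py : Prop := ∀ (segments : List (List (String × Option String))), Dom_cap_emphasis_segments_py segments → Spec_cap_emphasis_segments_py segments (cap_emphasis_segments_py segments)

-- ===== LEMMAS AND PROOFS =====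

theorem pvCountEmph_eq (segments : List (List (String × Option String))) :
    pvCountEmph segments = (segments.countP pvTruthy : Int) := by
  unfold pvCountEmph
  suffices h : ∀ (l : List (List (String × Option String))) (a : Int),
      l.foldl (fun acc seg => if pvTruthy seg then acc + 1 else acc) a = a + (l.countP pvTruthy : Int) by
    simpa using h segments 0
  intro l
  induction l with
  | nil => intro a; simp
  | cons s rest ih =>
    intro a
    by_cases ht : pvTruthy s <;> simp [ht, ih] <;> ring

theorem pvALoop_noclear (xs : List (List (String × Option String))) :
    ∀ m used, xs.countP pvTruthy + used ≤ m → pvALoop m used xs = xs := by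
  induction xs with
  | nil => intro m used _; rfl
  | cons s rest ih =>
    intro m used h
    rw [List.countP_cons] at h
    by_cases ht : pvTruthy s
    · simp only [pvALoop, ht, if_pos]
      rw [if_neg (by simp [ht] at h; omega), ih m (used + 1) (by simp [ht] at h; omega)]
    · simp only [pvALoop, ht, Bool.false_eq_true, if_false]
      rw [ih m used (by simp [ht] at h; omega)]

theorem pvALoop_append_single (xs : List (List (String × Option String)))
    (s : List (String × Option String)) :
    ∀ m used, pvALoop m used (xs ++ [s]) =
      pvALoop m used xs ++
        [if pvTruthy s then
            (if used + xs.countP pvTruthy + 1 > m then pvClear s else s)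
          else s] := by
  induction xs with
  | nil =>
    intro m used
    by_cases ht : pvTruthy s <;> simp [pvALoop, ht]
  | cons x rest ih =>
    intro m used
    rw [List.cons_append]
    by_cases hx : pvTruthy x
    · simp only [pvALoop, if_pos, ih m (used + 1), List.countP_cons, hx]
      have : used + 1 + rest.countP pvTruthy + 1 = used + (rest.countP pvTruthy + 1) + 1 := by omega
      rw [this]
      simp
    · simp only [pvALoop, Bool.false_eq_true, if_false, ih m used, List.countP_cons, hx]
      simp

theorem pvBLoop_nonpos (L : List (List (String × Option String))) (e : Int) (he : e ≤ 0) :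
    pvBLoop e L = L := by
  cases L with
  | nil => rfl
  | cons s rest => simp [pvBLoop, he]

theorem pvBLoop_eq_pvALoop (L : List (List (String × Option String))) :
    ∀ (e : Nat), e ≤ L.countP pvTruthy →
      (pvBLoop (e : Int) L).reverse = pvALoop (L.countP pvTruthy - e) 0 L.reverse := by
  induction L with
  | nil => intro e _; rfl
  | cons s rest ih =>
    intro e he
    rw [List.countP_cons] at he ⊢
    match e with
    | 0 =>
      rw [pvBLoop_nonpos _ _ (by norm_num)]
      rw [pvALoop_noclear _ _ 0 (by rw [List.countP_reverse, List.countP_cons]; omega)]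
    | Nat.succ k =>
      have hpos : ¬ ((((k + 1 : Nat) : Int)) ≤ 0) := by push_cast; omega
      by_cases ht : pvTruthy s
      · simp only [ht, if_pos] at he
        have hk : k ≤ rest.countP pvTruthy := by omega
        simp only [pvBLoop, hpos, if_false, ht, if_pos, List.reverse_cons]
        have hc : (((k + 1 : Nat) : Int) - 1) = ((k : Nat) : Int) := by push_cast; ring
        rw [hc, pvALoop_append_single, ih k hk, List.countP_reverse]
        have h1 : rest.countP pvTruthy + 1 - k.succ = rest.countP pvTruthy - k := by omega
        rw [h1]
        simp only [ht, if_pos]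
        rw [if_pos (show 0 + rest.countP pvTruthy + 1 > rest.countP pvTruthy - k by omega)]
      · simp only [ht, Bool.false_eq_true, if_false] at he
        simp only [pvBLoop, hpos, if_false, ht, Bool.false_eq_true, List.reverse_cons]
        rw [pvALoop_append_single, ih (k + 1) (by omega), List.countP_reverse]
        simp only [ht, Bool.false_eq_true, if_false]
        have h1 : rest.countP pvTruthy + 0 - k.succ = rest.countP pvTruthy - (k + 1) := by omega
        rw [h1]

theorem alt_eq_pvALoop (segments : List (List (String × Option String))) :
    cap_emphasis_segments_py_alt segments
      = pvALoop (max 1 (pvInt03 segments.length)) 0 segments := by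
  simp only [cap_emphasis_segments_py_alt]
  rw [pvCountEmph_eq]
  generalize hM : max 1 (pvInt03 segments.length) = m
  generalize hT : segments.countP pvTruthy = t
  by_cases hle : t ≤ m
  · have he : ((t : Int) - (m : Int)) ≤ 0 := by omega
    rw [pvBLoop_nonpos _ _ he, List.reverse_reverse,
        pvALoop_noclear segments m 0 (by rw [hT]; omega)]
  · have hcast : ((t : Int) - (m : Int)) = ((t - m : Nat) : Int) := by omega
    rw [hcast, pvBLoop_eq_pvALoop segments.reverse (t - m)
          (by rw [List.countP_reverse, hT]; omega),
        List.reverse_reverse, List.countP_reverse, hT]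
    have h2 : t - (t - m) = m := by omega
    rw [h2]

-- ===== VERDICT (by name: the statement is the Claim_ definition above) =====
theorem cap_emphasis_segments_py_spec : Claim_equal_cap_emphasis_segments_py := by
  intro segments _
  unfold Spec_cap_emphasis_segments_py cap_emphasis_segments_py
  by_cases h : segments.isEmpty
  · have hnil : segments = [] := List.isEmpty_iff.mp h
    subst hnil; rfl
  · rw [if_neg h, alt_eq_pvALoop]
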